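-- pv_equiv track=rewrite | github.com/xidongc/py_leetcode | hashmap/356 line-reflection.py | isReflected
-- ===== SOURCE A (Python) =====
-- def isReflected(points):
--     """
--     :type points: List[List[int]]
--     :rtype: bool
--     """
--     if not points:
--         return False
--     # Cannot set to 0 at the first time, since the number can be negative
--     minValue = points[0][0]
--     maxValue = points[0][0]
--     resSet = set()
--     for p in points:
--         minValue = min(minValue,p[0])
--         maxValue = max(maxValue, p[0])
--         resSet.add((p[0],p[1]))
--     #
--     line = minValue + maxValue
--
--     for p in points:
--         if  (line - p[0],p[1]) not in resSet:
--             return False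
--     return True
-- ===== SOURCE B (Python) =====
-- def isReflected(points):
--     if not points:
--         return False
--     xs_all = [p[0] for p in points]
--     line = min(xs_all) + max(xs_all)
--     groups = {}
--     for p in points:
--         groups.setdefault(p[1], []).append(p[0])
--     for xs in groups.values():
--         s = sorted(set(xs))
--         n = len(s)
--         for i in range(n):
--             if s[i] + s[n - 1 - i] != line:
--                 return False
--     return True
-- ===== Notes on version B (the rewrite author's own statement) =====
-- stated objective: alternative
-- what changed: B replaces A's per-point mirrored-membership lookup in a set of (x,y) pairs by grouping points by y into a dict, then sorting each group's distinct x-values and checking s[i]+s[n-1-i]==line with paired indices from both ends.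
import Mathlib
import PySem

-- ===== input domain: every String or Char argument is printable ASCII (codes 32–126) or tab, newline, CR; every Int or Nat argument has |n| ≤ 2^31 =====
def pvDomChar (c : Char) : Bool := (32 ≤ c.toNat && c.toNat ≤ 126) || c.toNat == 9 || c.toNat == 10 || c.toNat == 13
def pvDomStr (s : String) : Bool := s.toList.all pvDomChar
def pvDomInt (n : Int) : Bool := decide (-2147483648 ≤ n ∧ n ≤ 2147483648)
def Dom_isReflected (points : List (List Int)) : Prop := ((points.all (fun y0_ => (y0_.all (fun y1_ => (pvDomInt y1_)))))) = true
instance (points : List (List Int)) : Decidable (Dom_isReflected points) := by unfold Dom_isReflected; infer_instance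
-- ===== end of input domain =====

-- B groups points by y and checks each group's sorted distinct x-values with paired indices
-- s[i]+s[n-1-i]==line, instead of A's per-point mirrored membership test in a set of pairs.

-- ===== PORT A =====
-- p[0] / p[1] as total lookups: exact under Pre_ (every point has length ≥ 2)
def pvX (p : List Int) : Int := PySem.List.pyGetD p 0 0
def pvY (p : List Int) : Int := PySem.List.pyGetD p 1 0

def isReflected (points : List (List Int)) : Bool :=
  if points = [] then false
  else
    let first := pvX (PySem.List.pyGetD points 0 [])   -- points[0][0]
    let st := points.foldl
      (fun (acc : Int × Int × PySem.Set (Int × Int)) p =>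
        (min acc.1 (pvX p), max acc.2.1 (pvX p), PySem.Set.add acc.2.2 (pvX p, pvY p)))
      (first, first, PySem.Set.empty)
    let line := st.1 + st.2.1
    points.all (fun p => PySem.Set.contains st.2.2 (line - pvX p, pvY p))

-- ===== PORT B =====
def isReflected_alt (points : List (List Int)) : Bool :=
  if points = [] then false
  else
    let xsAll := points.map (fun p => pvX p)
    let line := (PySem.List.min? xsAll (fun x => x)).getD 0 + (PySem.List.max? xsAll (fun x => x)).getD 0
    let groups := points.foldl
      (fun (d : PySem.Dict Int (List Int)) p => d.modify (pvY p) [] (fun xs => xs ++ [pvX p]))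
      PySem.Dict.empty
    groups.values.all (fun xs =>
      let s := PySem.List.sorted (PySem.Set.ofList xs) (fun x => x) false
      let n := s.length
      (PySem.List.pyRange 0 (n : Int) 1).all (fun i =>
        PySem.List.pyGetD s i 0 + PySem.List.pyGetD s ((n : Int) - 1 - i) 0 == line))

-- ===== PRECONDITION & SPEC =====
-- Pre_ excludes exactly the inputs where Python A raises IndexError: a point with fewer than two coordinates.
def Pre_isReflected (points : List (List Int)) : Prop := ∀ p ∈ points, 2 ≤ p.length
instance (points : List (List Int)) : Decidable (Pre_isReflected points) := by unfold Pre_isReflected; infer_instance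
def pvWitness_isReflected : List (List Int) := [[1, 0], [-1, 0]]

def Spec_isReflected (points : List (List Int)) (out : Bool) : Prop := out = isReflected_alt points
instance (points : List (List Int)) (out : Bool) : Decidable (Spec_isReflected points out) := by unfold Spec_isReflected; infer_instance

-- ===== CLAIM (what is proved, stated in full; the proofs are below) =====
def Claim_equal_isReflected : Prop := ∀ (points : List (List Int)), Dom_isReflected points → Pre_isReflected points → Spec_isReflected points (isReflected points)

-- ===== LEMMAS AND PROOFS =====

lemma foldA_char (pts : List (List Int)) (m M : Int) (s : PySem.Set (Int × Int)) :
    pts.foldl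
      (fun (acc : Int × Int × PySem.Set (Int × Int)) p =>
        (min acc.1 (pvX p), max acc.2.1 (pvX p), PySem.Set.add acc.2.2 (pvX p, pvY p)))
      (m, M, s)
    = ((pts.map pvX).foldl min m, (pts.map pvX).foldl max M,
       pts.foldl (fun s p => PySem.Set.add s (pvX p, pvY p)) s) := by
  induction pts generalizing m M s with
  | nil => rfl
  | cons q t ih => simp [List.foldl_cons, ih]

lemma paired_core (s : List Int) (line : Int) (g : List Int)
    (hnd : s.Nodup) (hpl : s.Pairwise (· < ·)) (hmem : ∀ x, x ∈ s ↔ x ∈ g)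
    (hsort : PySem.List.sorted (PySem.Set.ofList g) (fun x => x) false = s) :
    ((PySem.List.pyRange 0 (s.length : Int) 1).all
      (fun i => PySem.List.pyGetD s i 0 + PySem.List.pyGetD s ((s.length : Int) - 1 - i) 0 == line) = true)
    ↔ ∀ x ∈ g, (line - x) ∈ g := by
  have hpair : ∀ (i : Nat) (hi : i < s.length),
      (PySem.List.pyGetD s (i : Int) 0 + PySem.List.pyGetD s ((s.length : Int) - 1 - (i : Int)) 0 = line)
      ↔ (s[i] + s[s.length - 1 - i]'(by omega) = line) := by
    intro i hi
    rw [PySem.List.pyGetD_of_nonneg s 0 (by positivity), PySem.List.pyGetD_of_nonneg s 0 (by omega)]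
    have h1 : ((i : Int)).toNat = i := by omega
    have h2 : ((s.length : Int) - 1 - (i : Int)).toNat = s.length - 1 - i := by omega
    rw [h1, h2, List.getD_eq_getElem s 0 hi, List.getD_eq_getElem s 0 (by omega)]
  simp only [List.all_eq_true, PySem.List.mem_pyRange_one, beq_iff_eq]
  constructor
  · -- index condition → closure
    intro H x hx
    obtain ⟨i, hi, rfl⟩ := List.mem_iff_getElem.mp ((hmem x).mpr hx)
    have := (hpair i hi).mp (H (i : Int) ⟨by positivity, by omega⟩)
    have hm : s[s.length - 1 - i]'(by omega) ∈ s := List.getElem_mem _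
    have : line - s[i] = s[s.length - 1 - i]'(by omega) := by omega
    rw [this]
    exact (hmem _).mp hm
  · -- closure → index condition, via s = reverse of its mirror
    intro H i ⟨h0, hn⟩
    set t : List Int := s.reverse.map (fun x => line - x) with ht
    have hinj : Function.Injective (fun x : Int => line - x) := by
      intro a b h; simpa using h
    have htnd : t.Nodup := List.Nodup.map hinj (List.nodup_reverse.mpr hnd)
    have htmem : ∀ x, x ∈ t ↔ x ∈ s := by
      intro x
      simp only [ht, List.mem_map, List.mem_reverse]
      constructor
      · rintro ⟨y, hy, rfl⟩
        exact (hmem _).mpr (H y ((hmem y).mp hy))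
      · intro hx
        exact ⟨line - x, (hmem _).mpr (H x ((hmem x).mp hx)), by ring⟩
    have hperm : t.Perm s := (List.perm_ext_iff_of_nodup htnd hnd).mpr htmem
    have htpl : t.Pairwise (· < ·) := by
      rw [ht, List.pairwise_map, List.pairwise_reverse]
      exact hpl.imp (by intro a b h; omega)
    have hst : s = t := by
      have := PySem.List.sorted_eq_of_perm_of_pairwise_lt (xs := PySem.Set.ofList g)
        (ys := t) (key := fun x => x) (hperm.trans (by
          exact (List.perm_ext_iff_of_nodup hnd (PySem.Set.nodup_ofList g)).mpr
            (fun x => (hmem x).trans (PySem.Set.mem_ofList g x).symm))) htpl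
      rw [hsort] at this; exact this
    lift i to Nat using h0 with j
    have hj : j < s.length := by exact_mod_cast hn
    rw [hpair j hj]
    have hlen : t.length = s.length := by simp [ht]
    rw [List.getElem_of_eq hst hj]
    have : t[j]'(by omega) = line - s[s.length - 1 - j]'(by omega) := by
      simp only [ht, List.getElem_map, List.getElem_reverse]
    omega

lemma paired_sum_iff_closed (g : List Int) (line : Int) :
    (∀ i ∈ PySem.List.pyRange 0 ((PySem.List.sorted (PySem.Set.ofList g) (fun x => x) false).length : Int) 1,
        ((PySem.List.pyGetD (PySem.List.sorted (PySem.Set.ofList g) (fun x => x) false) i 0 +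
          PySem.List.pyGetD (PySem.List.sorted (PySem.Set.ofList g) (fun x => x) false)
            (((PySem.List.sorted (PySem.Set.ofList g) (fun x => x) false).length : Int) - 1 - i) 0 == line) = true))
    ↔ ∀ x ∈ g, (line - x) ∈ g := by
  rw [← List.all_eq_true]
  apply paired_core
  · exact ((PySem.List.sorted_perm (PySem.Set.ofList g) (fun x => x) false).nodup_iff).mpr (PySem.Set.nodup_ofList g)
  · exact PySem.List.sorted_ofList_pairwise_lt g
  · intro x
    rw [PySem.List.mem_sorted, PySem.Set.mem_ofList]
  · rfl

theorem isReflected_eq_alt (points : List (List Int)) :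
    isReflected points = isReflected_alt points := by
  unfold isReflected isReflected_alt
  cases points with
  | nil => rfl
  | cons q t =>
    simp only [reduceCtorEq, if_false, foldA_char]
    have hx0 : PySem.List.pyGetD (q :: t) 0 ([] : List Int) = q :=
      PySem.List.pyGetD_zero_cons ..
    rw [hx0]
    have hmin : (PySem.List.min? ((q :: t).map (fun p => pvX p)) (fun x => x)).getD 0
        = ((q :: t).map pvX).foldl min (pvX q) := by
      rw [List.map_cons, PySem.List.min?_id_cons]
      simp [List.foldl_cons]
    have hmax : (PySem.List.max? ((q :: t).map (fun p => pvX p)) (fun x => x)).getD 0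
        = ((q :: t).map pvX).foldl max (pvX q) := by
      rw [List.map_cons, PySem.List.max?_id_cons]
      simp [List.foldl_cons]
    rw [hmin, hmax]
    set line := ((q :: t).map pvX).foldl min (pvX q) + ((q :: t).map pvX).foldl max (pvX q) with hline
    clear_value line
    -- A's set
    have hset : (q :: t).foldl (fun s p => PySem.Set.add s (pvX p, pvY p)) PySem.Set.empty
        = PySem.Set.ofList ((q :: t).map (fun p => (pvX p, pvY p))) := by
      rw [PySem.Set.ofList_eq_foldl, List.foldl_map]
      rfl
    rw [hset]
    -- B's dict
    set pts := q :: t with hpts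
    have hdict : pts.foldl
        (fun (d : PySem.Dict Int (List Int)) p => d.modify (pvY p) [] (fun xs => xs ++ [pvX p]))
        PySem.Dict.empty
      = (pts.map (fun p => (pvY p, pvX p))).foldl
          (fun d pr => d.modify pr.1 [] (fun xs => xs ++ [pr.2])) PySem.Dict.empty := by
      rw [List.foldl_map]
    rw [hdict]
    set d := (pts.map (fun p => (pvY p, pvX p))).foldl
        (fun d pr => d.modify pr.1 [] (fun xs => xs ++ [pr.2])) PySem.Dict.empty with hd
    have hkeysnd : d.keys.Nodup := by
      rw [hd, List.foldl_map]
      exact PySem.Dict.nodup_keys_foldl_modify_key pts pvY [] (fun d p xs => xs ++ [pvX p])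
        PySem.Dict.empty PySem.Dict.nodup_keys_empty
    have hkeys : d.keys = PySem.Set.ofList (pts.map pvY) := by
      rw [hd, List.foldl_map]
      rw [PySem.Dict.keys_foldl_modify_key pts pvY [] (fun d p xs => xs ++ [pvX p]) PySem.Dict.empty]
      simp [PySem.Set.update, PySem.Set.ofList_eq_foldl]
    have hgetD : ∀ y, d.getD y [] = ((pts.map (fun p => (pvY p, pvX p))).filter (fun pr => pr.1 == y)).map (fun pr => pr.2) := by
      intro y
      rw [hd, PySem.Dict.getD_foldl_modify_append]
      simp
    have hvals : d.values = d.keys.map (fun k => d.getD k []) :=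
      PySem.Dict.values_eq_map_keys d hkeysnd []
    rw [hvals, List.all_map]
    rw [Bool.eq_iff_iff]
    simp only [List.all_eq_true, Function.comp, PySem.Set.contains_iff, PySem.Set.mem_ofList]
    simp only [paired_sum_iff_closed]
    have hgrp : ∀ x y, x ∈ d.getD y [] ↔ ∃ p ∈ pts, pvY p = y ∧ pvX p = x := by
      intro x y; rw [hgetD]; simp [List.mem_filter]
    constructor
    · intro H y hy x hx
      obtain ⟨p, hp, hpy, hpx⟩ := (hgrp x y).mp hx
      obtain ⟨p', hp', hEq⟩ := List.mem_map.mp (H p hp)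
      rw [hgrp]
      refine ⟨p', hp', ?_, ?_⟩
      · have h2 := congrArg Prod.snd hEq
        simp only at h2
        rw [h2, hpy]
      · have h1 := congrArg Prod.fst hEq
        simp only at h1
        rw [h1, hpx]
    · intro H p hp
      have hy : pvY p ∈ d.keys := by
        rw [hkeys, PySem.Set.mem_ofList]
        exact List.mem_map_of_mem hp
      have hx : pvX p ∈ d.getD (pvY p) [] := (hgrp _ _).mpr ⟨p, hp, rfl, rfl⟩
      obtain ⟨p', hp', h1, h2⟩ := (hgrp _ _).mp (H (pvY p) hy (pvX p) hx)
      rw [List.mem_map]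
      exact ⟨p', hp', by rw [h1, h2]⟩

-- ===== VERDICT (by name: the statement is the Claim_ definition above) =====
theorem isReflected_spec : Claim_equal_isReflected := by
  intro points _ _
  exact isReflected_eq_alt points
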